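-- pv_equiv track=rewrite | github.com/hazemAI/Arabic-Lip-Reading-testing-public | model/inference.py | remove_consecutive_subsequences
-- ===== SOURCE A (Python) =====
-- def remove_consecutive_subsequences(seq):
--     if not seq: return []
--     res=[]; i=0; n=len(seq)
--     while i<n:
--         found=False
--         max_L=(n-i)//2
--         for L in range(max_L,0,-1):
--             if seq[i:i+L]==seq[i+L:i+2*L]:
--                 res.extend(seq[i:i+L])
--                 i+=2*L; found=True; break
--         if not found:
--             res.append(seq[i]); i+=1
--     return res
-- ===== SOURCE B (Python) =====
-- def remove_consecutive_subsequences(seq):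
--     # Same greedy longest-double collapse, but a candidate length is screened first by a
--     # first-element check and a precomputed prefix polynomial hash comparison (O(1) per
--     # candidate length); the slices are compared only when both screens pass.
--     n = len(seq)
--     if n == 0:
--         return []
--     MOD = (1 << 61) - 1
--     BASE = 1000003
--     h = [0] * (n + 1)
--     pw = [1] * (n + 1)
--     for k in range(n):
--         h[k + 1] = (h[k] * BASE + seq[k] % MOD) % MOD
--         pw[k + 1] = pw[k] * BASE % MOD
--     res = []
--     i = 0
--     while i < n:
--         found = False
--         ei = seq[i]
--         hi = h[i]
--         for L in range((n - i) // 2, 0, -1):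
--             if ei == seq[i + L] \
--                     and (h[i + L] - hi * pw[L]) % MOD == (h[i + 2 * L] - h[i + L] * pw[L]) % MOD \
--                     and seq[i:i + L] == seq[i + L:i + 2 * L]:
--                 res.extend(seq[i:i + L])
--                 i += 2 * L
--                 found = True
--                 break
--         if not found:
--             res.append(seq[i])
--             i += 1
--     return res
-- ===== Notes on version B (the rewrite author's own statement) =====
-- stated objective: faster
-- what changed: The O(L) slice comparison tried for every candidate length is replaced by an O(1) screen (first-element check plus a precomputed rolling prefix-hash comparison), with the actual slice equality verified only when the screen passes.
import Mathlib
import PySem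

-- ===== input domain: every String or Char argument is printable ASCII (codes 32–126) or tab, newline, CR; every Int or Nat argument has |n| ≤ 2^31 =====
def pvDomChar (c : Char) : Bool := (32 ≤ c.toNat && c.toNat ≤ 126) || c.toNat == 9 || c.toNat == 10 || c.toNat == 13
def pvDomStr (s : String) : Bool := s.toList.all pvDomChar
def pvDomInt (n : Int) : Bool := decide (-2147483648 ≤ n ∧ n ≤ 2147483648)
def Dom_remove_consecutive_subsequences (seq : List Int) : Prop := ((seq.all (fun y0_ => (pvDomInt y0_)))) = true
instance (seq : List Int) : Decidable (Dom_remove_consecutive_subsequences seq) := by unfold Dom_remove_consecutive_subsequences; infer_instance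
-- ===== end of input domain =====

-- B replaces A's per-candidate O(L) slice comparison by a precomputed rolling prefix-hash
-- screen (O(1) per candidate length), verifying the slice equality only on a hash match.

-- ===== PORT A =====
-- inner 'for L in range(max_L,0,-1): if seq[i:i+L]==seq[i+L:i+2*L]: … break' = first match of the descending range
def rcsSearchA (seq : List Int) (n i : Int) : Option Int :=
  (PySem.List.pyRange (PySem.Int.floordiv (n - i) 2) 0 (-1)).find?
    (fun L => PySem.List.slice seq (some i) (some (i + L)) ==
              PySem.List.slice seq (some (i + L)) (some (i + 2 * L)))

-- the 'while i<n' loop; seq[i] is in range whenever read (0 ≤ i < n), so pyGetD is exact here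
def rcsLoopA (seq : List Int) (n i : Int) (res : List Int) : List Int :=
  if hlt : i < n then
    match hs : rcsSearchA seq n i with
    | some L => rcsLoopA seq n (i + 2 * L) (res ++ PySem.List.slice seq (some i) (some (i + L)))
    | none => rcsLoopA seq n (i + 1) (res ++ [PySem.List.pyGetD seq i 0])
  else res
termination_by (n - i).toNat
decreasing_by
  · have hm := List.mem_of_find?_eq_some hs
    rw [PySem.List.mem_pyRange_neg_one] at hm
    omega
  · omega

def remove_consecutive_subsequences (seq : List Int) : List Int :=
  if seq = [] then [] else rcsLoopA seq (seq.length : Int) 0 []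

-- ===== PORT B =====
def rcsM : Int := 2305843009213693951
def rcsB : Int := 1000003

-- the 'for k in range(n): h[k+1] = (h[k]*BASE + seq[k] % MOD) % MOD' loop, producing the h table
def rcsHScan (acc : Int) : List Int → List Int
  | [] => [acc]
  | x :: xs => acc :: rcsHScan (PySem.Int.mod (acc * rcsB + PySem.Int.mod x rcsM) rcsM) xs

-- the 'pw[k+1] = pw[k]*BASE % MOD' loop, producing the pw table
def rcsPw (acc : Int) : Nat → List Int
  | 0 => [acc]
  | k + 1 => acc :: rcsPw (PySem.Int.mod (acc * rcsB) rcsM) k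

-- B's inner loop: first-element screen, then the inlined hash comparison, then the slice check;
-- all list reads (seq[i], seq[i+L], h[..], pw[L]) are in range whenever evaluated, so pyGetD is exact here
def rcsSearchB (seq h pw : List Int) (n i : Int) : Option Int :=
  (PySem.List.pyRange (PySem.Int.floordiv (n - i) 2) 0 (-1)).find?
    (fun L => (PySem.List.pyGetD seq i 0 == PySem.List.pyGetD seq (i + L) 0) &&
      (PySem.Int.mod (PySem.List.pyGetD h (i + L) 0 -
          PySem.List.pyGetD h i 0 * PySem.List.pyGetD pw L 0) rcsM ==
       PySem.Int.mod (PySem.List.pyGetD h (i + 2 * L) 0 -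
          PySem.List.pyGetD h (i + L) 0 * PySem.List.pyGetD pw L 0) rcsM) &&
      (PySem.List.slice seq (some i) (some (i + L)) ==
       PySem.List.slice seq (some (i + L)) (some (i + 2 * L))))

def rcsLoopB (seq h pw : List Int) (n i : Int) (res : List Int) : List Int :=
  if hlt : i < n then
    match hs : rcsSearchB seq h pw n i with
    | some L => rcsLoopB seq h pw n (i + 2 * L) (res ++ PySem.List.slice seq (some i) (some (i + L)))
    | none => rcsLoopB seq h pw n (i + 1) (res ++ [PySem.List.pyGetD seq i 0])
  else res
termination_by (n - i).toNat
decreasing_by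
  · have hm := List.mem_of_find?_eq_some hs
    rw [PySem.List.mem_pyRange_neg_one] at hm
    omega
  · omega

def remove_consecutive_subsequences_alt (seq : List Int) : List Int :=
  if seq.length = 0 then []
  else rcsLoopB seq (rcsHScan 0 seq) (rcsPw 1 seq.length) (seq.length : Int) 0 []

-- ===== PRECONDITION & SPEC =====
def Spec_remove_consecutive_subsequences (seq : List Int) (out : List Int) : Prop := out = remove_consecutive_subsequences_alt seq
instance (seq : List Int) (out : List Int) : Decidable (Spec_remove_consecutive_subsequences seq out) := by unfold Spec_remove_consecutive_subsequences; infer_instance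

-- ===== CLAIM (what is proved, stated in full; the proofs are below) =====
def Claim_equal_remove_consecutive_subsequences : Prop := ∀ (seq : List Int), Dom_remove_consecutive_subsequences seq → Spec_remove_consecutive_subsequences seq (remove_consecutive_subsequences seq)

-- ===== LEMMAS AND PROOFS =====

-- abbreviation for Python's '%' by the positive modulus rcsM: it is Int.emod
lemma rcsmod_eq (a : Int) : PySem.Int.mod a rcsM = a % rcsM :=
  PySem.Int.mod_eq_emod_of_pos (by norm_num [rcsM])

-- the value h[k]: folding the hash step over the first k elements
def rcsHFold (a : Int) (xs : List Int) : Int :=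
  xs.foldl (fun acc x => (acc * rcsB + x % rcsM) % rcsM) a

lemma rcsHScan_getD (xs : List Int) (a : Int) (k : Nat) (hk : k ≤ xs.length) :
    (rcsHScan a xs).getD k 0 = rcsHFold a (xs.take k) := by
  induction xs generalizing a k with
  | nil =>
    have : k = 0 := by simpa using hk
    subst this
    simp [rcsHScan, rcsHFold]
  | cons x xs ih =>
    cases k with
    | zero => simp [rcsHScan, rcsHFold]
    | succ k =>
      simp only [rcsHScan, List.getD_cons_succ, List.take_succ_cons]
      rw [ih _ k (by simpa using hk)]
      simp [rcsHFold, rcsmod_eq]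

def rcsPwFold (a : Int) : Nat → Int
  | 0 => a
  | k + 1 => rcsPwFold ((a * rcsB) % rcsM) k

lemma rcsPw_getD (a : Int) (m k : Nat) (hk : k ≤ m) :
    (rcsPw a m).getD k 0 = rcsPwFold a k := by
  induction m generalizing a k with
  | zero =>
    have : k = 0 := by omega
    subst this
    simp [rcsPw, rcsPwFold]
  | succ m ih =>
    cases k with
    | zero => simp [rcsPw, rcsPwFold]
    | succ k =>
      simp only [rcsPw, List.getD_cons_succ, rcsPwFold]
      rw [ih _ k (by omega), rcsmod_eq]

lemma rcsPwFold_eq (a : Int) (k : Nat) (ha : 0 ≤ a) (ha' : a < rcsM) :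
    rcsPwFold a k = (a * rcsB ^ k) % rcsM := by
  induction k generalizing a with
  | zero => simpa [rcsPwFold] using (Int.emod_eq_of_lt ha ha').symm
  | succ k ih =>
    have hM : (0:Int) < rcsM := by norm_num [rcsM]
    rw [rcsPwFold, ih _ (Int.emod_nonneg _ (by norm_num [rcsM])) (Int.emod_lt_of_pos _ hM)]
    have h2 : a * rcsB ^ (k + 1) = a * rcsB * rcsB ^ k := by ring
    simp [h2, Int.mul_emod, Int.emod_emod_of_dvd]

lemma rcsHFold_modEq (xs : List Int) (a : Int) :
    rcsHFold a xs ≡ a * rcsB ^ xs.length + rcsHFold 0 xs [ZMOD rcsM] := by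
  induction xs generalizing a with
  | nil => simp [rcsHFold]
  | cons x xs ih =>
    have hmod : ∀ y : Int, (y % rcsM) ≡ y [ZMOD rcsM] := fun y => Int.emod_emod_of_dvd y dvd_rfl
    have step : rcsHFold a (x :: xs) = rcsHFold ((a * rcsB + x % rcsM) % rcsM) xs := by
      simp [rcsHFold]
    have step0 : rcsHFold 0 (x :: xs) = rcsHFold ((x % rcsM) % rcsM) xs := by
      simp [rcsHFold]
    have ha' : ((a * rcsB + x % rcsM) % rcsM : Int) ≡ a * rcsB + x [ZMOD rcsM] :=
      (hmod _).trans ((hmod x).add_left _)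
    have h0 : rcsHFold 0 (x :: xs) ≡ x * rcsB ^ xs.length + rcsHFold 0 xs [ZMOD rcsM] := by
      rw [step0]
      exact (ih _).trans ((((hmod _).trans (hmod x)).mul_right _).add_right _)
    calc rcsHFold a (x :: xs) = rcsHFold ((a * rcsB + x % rcsM) % rcsM) xs := step
      _ ≡ ((a * rcsB + x % rcsM) % rcsM) * rcsB ^ xs.length + rcsHFold 0 xs [ZMOD rcsM] := ih _
      _ ≡ (a * rcsB + x) * rcsB ^ xs.length + rcsHFold 0 xs [ZMOD rcsM] :=
          (ha'.mul_right _).add_right _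
      _ = a * rcsB ^ (x :: xs).length + (x * rcsB ^ xs.length + rcsHFold 0 xs) := by
          simp [List.length_cons]; ring
      _ ≡ a * rcsB ^ (x :: xs).length + rcsHFold 0 (x :: xs) [ZMOD rcsM] := h0.symm.add_left _

lemma rcsHFold_append (a : Int) (u v : List Int) :
    rcsHFold a (u ++ v) = rcsHFold (rcsHFold a u) v := by
  simp [rcsHFold, List.foldl_append]

-- the hash comparison value for the block seq[l:l+L] is a function of that slice alone
lemma rcsHsub_eq (seq : List Int) (l L : Int) (hl : 0 ≤ l) (hL : 0 ≤ L)
    (hr : l + L ≤ (seq.length : Int)) :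
    PySem.Int.mod (PySem.List.pyGetD (rcsHScan 0 seq) (l + L) 0 -
        PySem.List.pyGetD (rcsHScan 0 seq) l 0 * PySem.List.pyGetD (rcsPw 1 seq.length) L 0) rcsM =
      (rcsHFold 0 (PySem.List.slice seq (some l) (some (l + L)))) % rcsM := by
  set lN := l.toNat with hlN
  set dN := L.toNat with hdN
  rw [rcsmod_eq, show l + L = ((lN + dN : Nat) : Int) by omega,
      show l = ((lN : Nat) : Int) by omega, show L = ((dN : Nat) : Int) by omega]
  simp only [PySem.List.pyGetD_natCast]
  rw [rcsHScan_getD seq 0 (lN + dN) (by omega), rcsHScan_getD seq 0 lN (by omega),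
      rcsPw_getD 1 seq.length dN (by omega),
      rcsPwFold_eq 1 _ (by norm_num) (by norm_num [rcsM]), one_mul]
  rw [PySem.List.slice_natCast, Nat.add_sub_cancel_left, List.take_add, rcsHFold_append]
  have hlen : ((seq.drop lN).take dN).length = dN := by
    simp only [List.length_take, List.length_drop]
    omega
  have hmod : ∀ y : Int, (y % rcsM) ≡ y [ZMOD rcsM] := fun y => Int.emod_emod_of_dvd y dvd_rfl
  have key := rcsHFold_modEq ((seq.drop lN).take dN) (rcsHFold 0 (seq.take lN))
  rw [hlen] at key
  have h2 := key.sub ((hmod (rcsB ^ dN)).mul_left (rcsHFold 0 (seq.take lN)))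
  have h3 : rcsHFold (rcsHFold 0 (seq.take lN)) ((seq.drop lN).take dN) -
      rcsHFold 0 (seq.take lN) * (rcsB ^ dN % rcsM) ≡
      rcsHFold 0 ((seq.drop lN).take dN) [ZMOD rcsM] := by
    simpa using h2
  exact h3

-- equal adjacent blocks have equal first elements (soundness of B's cheap screen)
lemma rcsElem_eq (seq : List Int) (i L : Int) (hi : 0 ≤ i) (hL : 0 < L)
    (h2 : i + 2 * L ≤ (seq.length : Int))
    (hsl : PySem.List.slice seq (some i) (some (i + L)) =
           PySem.List.slice seq (some (i + L)) (some (i + 2 * L))) :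
    PySem.List.pyGetD seq i 0 = PySem.List.pyGetD seq (i + L) 0 := by
  set iN := i.toNat with hiN
  set LN := L.toNat with hLN
  have hsl' : (seq.drop iN).take LN = (seq.drop (iN + LN)).take LN := by
    rw [show i + 2 * L = ((iN + LN + LN : Nat) : Int) by omega,
        show i + L = ((iN + LN : Nat) : Int) by omega,
        show i = ((iN : Nat) : Int) by omega,
        PySem.List.slice_natCast, PySem.List.slice_natCast] at hsl
    simpa [Nat.add_sub_cancel_left] using hsl
  have hq := congrArg (fun t => t[0]?) hsl'
  simp only [List.getElem?_take_of_lt (show 0 < LN by omega), List.getElem?_drop,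
    Nat.add_zero] at hq
  rw [show i + L = ((iN + LN : Nat) : Int) by omega, show i = ((iN : Nat) : Int) by omega]
  simp only [PySem.List.pyGetD_natCast]
  rw [List.getD_eq_getElem?_getD, List.getD_eq_getElem?_getD, hq]

lemma rcsFind?_congr {α : Type} (p q : α → Bool) :
    ∀ l : List α, (∀ x ∈ l, p x = q x) → l.find? p = l.find? q
  | [], _ => rfl
  | x :: xs, h => by
    simp only [List.find?_cons]
    rw [h x (by simp)]
    cases q x
    · exact rcsFind?_congr p q xs (fun y hy => h y (by simp [hy]))
    · rfl

lemma rcsSearch_eq (seq : List Int) (i : Int) (hi : 0 ≤ i) :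
    rcsSearchB seq (rcsHScan 0 seq) (rcsPw 1 seq.length) (seq.length : Int) i =
      rcsSearchA seq (seq.length : Int) i := by
  unfold rcsSearchA rcsSearchB
  apply rcsFind?_congr
  intro L hL
  rw [PySem.List.mem_pyRange_neg_one] at hL
  obtain ⟨hL0, hLmax⟩ := hL
  have h2L : i + 2 * L ≤ (seq.length : Int) := by
    have := (PySem.Int.le_floordiv_iff_mul_le (by norm_num : (0:Int) < 2)).mp hLmax
    omega
  by_cases hslice : PySem.List.slice seq (some i) (some (i + L)) =
      PySem.List.slice seq (some (i + L)) (some (i + 2 * L))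
  · have helem := rcsElem_eq seq i L hi hL0 h2L hslice
    have hh : PySem.Int.mod (PySem.List.pyGetD (rcsHScan 0 seq) (i + L) 0 -
          PySem.List.pyGetD (rcsHScan 0 seq) i 0 * PySem.List.pyGetD (rcsPw 1 seq.length) L 0) rcsM =
        PySem.Int.mod (PySem.List.pyGetD (rcsHScan 0 seq) (i + 2 * L) 0 -
          PySem.List.pyGetD (rcsHScan 0 seq) (i + L) 0 * PySem.List.pyGetD (rcsPw 1 seq.length) L 0) rcsM := by
      rw [show i + 2 * L = (i + L) + L by ring,
          rcsHsub_eq seq i L hi (by omega) (by omega),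
          rcsHsub_eq seq (i + L) L (by omega) (by omega) (by omega),
          show (i + L) + L = i + 2 * L by ring, hslice]
    simp [hslice, helem, hh]
  · simp [hslice]

lemma rcsLoop_eq (seq : List Int) (fuel : Nat) :
    ∀ (i : Int) (res : List Int), ((seq.length : Int) - i).toNat ≤ fuel → 0 ≤ i →
      rcsLoopA seq (seq.length : Int) i res =
        rcsLoopB seq (rcsHScan 0 seq) (rcsPw 1 seq.length) (seq.length : Int) i res := by
  induction fuel with
  | zero =>
    intro i res hf hi
    rw [rcsLoopA.eq_def, rcsLoopB.eq_def]
    have hlt : ¬ i < (seq.length : Int) := by omega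
    simp [hlt]
  | succ fuel ih =>
    intro i res hf hi
    rw [rcsLoopA.eq_def, rcsLoopB.eq_def]
    by_cases hlt : i < (seq.length : Int)
    · rw [dif_pos hlt, dif_pos hlt, rcsSearch_eq seq i hi]
      cases hs : rcsSearchA seq (seq.length : Int) i with
      | none =>
        exact ih (i + 1) _ (by omega) (by omega)
      | some L =>
        have hm := List.mem_of_find?_eq_some hs
        rw [PySem.List.mem_pyRange_neg_one] at hm
        exact ih (i + 2 * L) _ (by omega) (by omega)
    · rw [dif_neg hlt, dif_neg hlt]

-- ===== VERDICT (by name: the statement is the Claim_ definition above) =====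
theorem remove_consecutive_subsequences_spec : Claim_equal_remove_consecutive_subsequences := by
  intro seq _
  unfold Spec_remove_consecutive_subsequences remove_consecutive_subsequences remove_consecutive_subsequences_alt
  by_cases h : seq = []
  · simp [h]
  · have hlen : seq.length ≠ 0 := by simpa using h
    simp only [h, hlen, if_false]
    exact rcsLoop_eq seq ((seq.length : Int) - 0).toNat 0 [] le_rfl le_rfl
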